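-- pv_equiv track=rewrite | github.com/kunalrb/advance-Bioinformatics-in-python | Patterns Forming Clumps in a String.py | clumps
-- ===== SOURCE A (Python) =====
-- def clumps(dna, frameSize, clumpSize, requiredOccurence):
--
--     dnaClumpsWithRequiredOccurence = set()
--
--     for i in range(len(dna)):
--         # Process next frame
--         if i + frameSize <= len(dna):
--             subDna = dna[i:i + frameSize]
--
--             # Within the frame find clumps of given size and count its frequencies
--             dnaClumps = dict()
--
--             for j in range(len(subDna)):
--                 if j + clumpSize <= len(subDna):
--                     dnaClump = subDna[j:j + clumpSize]
--
--                     if dnaClump in dnaClumps.keys():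
--                         dnaClumps[dnaClump] += 1
--                     else:
--                         dnaClumps[dnaClump] = 1
--
--             # For each dna clump, filter only those that meet the required occurence
--             for dnaClump, frequency in dnaClumps.items():
--                 if frequency >= requiredOccurence:
--                     dnaClumpsWithRequiredOccurence.add(dnaClump)
--
--     return dnaClumpsWithRequiredOccurence
-- ===== SOURCE B (Python) =====
-- def clumps(dna, frameSize, clumpSize, requiredOccurence):
--     # Sliding-window re-implementation: keep one running k-mer counter and
--     # update it as the window shifts by one position.
--     n = len(dna)
--     result = set()
--     if frameSize <= 0 or n < frameSize:
--         return result
--     if clumpSize <= 0 or frameSize < clumpSize: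
--         return result
--     counts = {}
--     for j in range(frameSize - clumpSize + 1):
--         kmer = dna[j:j + clumpSize]
--         counts[kmer] = counts.get(kmer, 0) + 1
--     for kmer, freq in counts.items():
--         if freq >= requiredOccurence:
--             result.add(kmer)
--     for i in range(1, n - frameSize + 1):
--         outK = dna[i - 1:i - 1 + clumpSize]
--         counts[outK] = counts[outK] - 1
--         inPos = i + frameSize - clumpSize
--         inK = dna[inPos:inPos + clumpSize]
--         counts[inK] = counts.get(inK, 0) + 1
--         if counts[inK] >= requiredOccurence:
--             result.add(inK)
--     return result
-- ===== Notes on version B (the rewrite author's own statement) =====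
-- stated objective: faster
-- what changed: A recounts all k-mers of every window from scratch (nested loops per window); B keeps one running k-mer counter and updates it by removing the leaving k-mer and adding the entering one as the window slides, checking only the entering k-mer against the threshold.
-- outside the precondition, e.g. on clumps('ABCDEFG', -3, 2, 1): A returns {'CD', 'EF', 'AB', 'BC', 'DE'}, B returns set(); on clumps('A', 1, 0, 1): A returns {''}, B returns set()
import Mathlib
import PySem

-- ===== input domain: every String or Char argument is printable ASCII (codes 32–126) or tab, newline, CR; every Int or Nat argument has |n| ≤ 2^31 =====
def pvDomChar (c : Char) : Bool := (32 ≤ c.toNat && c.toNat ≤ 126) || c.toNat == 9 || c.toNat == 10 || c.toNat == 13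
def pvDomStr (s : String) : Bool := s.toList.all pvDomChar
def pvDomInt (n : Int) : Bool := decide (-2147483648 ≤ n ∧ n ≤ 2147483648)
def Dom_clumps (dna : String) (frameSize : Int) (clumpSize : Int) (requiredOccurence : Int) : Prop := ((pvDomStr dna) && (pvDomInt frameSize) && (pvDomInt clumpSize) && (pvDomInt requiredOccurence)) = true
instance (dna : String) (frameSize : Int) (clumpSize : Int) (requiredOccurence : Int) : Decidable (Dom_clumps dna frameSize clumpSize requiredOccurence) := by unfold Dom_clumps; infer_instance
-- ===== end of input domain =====

-- B replaces A's per-window recount of all k-mers by a single running counter updated as the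
-- window slides (objective: faster).

-- ===== PORT A =====
def clumps (dna : String) (frameSize : Int) (clumpSize : Int) (requiredOccurence : Int) : List String :=
  (PySem.List.pyRange 0 (PySem.Str.len dna) 1).foldl (fun acc i =>
    if i + frameSize ≤ PySem.Str.len dna then
      let subDna := PySem.Str.slice dna (some i) (some (i + frameSize))
      let d : PySem.Dict String Int :=
        (PySem.List.pyRange 0 (PySem.Str.len subDna) 1).foldl (fun d j =>
          if j + clumpSize ≤ PySem.Str.len subDna then
            let c := PySem.Str.slice subDna (some j) (some (j + clumpSize))
            if d.contains c then d.modify c 0 (· + 1) else d.insert c 1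
          else d) PySem.Dict.empty
      d.items.foldl (fun acc p => if p.2 ≥ requiredOccurence then PySem.Set.add acc p.1 else acc) acc
    else acc) (PySem.Set.empty)

-- ===== PORT B =====
def clumps_alt (dna : String) (frameSize : Int) (clumpSize : Int) (requiredOccurence : Int) : List String :=
  let n := PySem.Str.len dna
  let result : PySem.Set String := PySem.Set.empty
  if frameSize ≤ 0 ∨ n < frameSize then result
  else if clumpSize ≤ 0 ∨ frameSize < clumpSize then result
  else
    let counts : PySem.Dict String Int :=
      (PySem.List.pyRange 0 (frameSize - clumpSize + 1) 1).foldl (fun d j =>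
        let kmer := PySem.Str.slice dna (some j) (some (j + clumpSize))
        d.insert kmer (d.getD kmer 0 + 1)) PySem.Dict.empty
    let result := counts.items.foldl (fun acc p =>
        if p.2 ≥ requiredOccurence then PySem.Set.add acc p.1 else acc) result
    ((PySem.List.pyRange 1 (n - frameSize + 1) 1).foldl (fun st i =>
        let outK := PySem.Str.slice dna (some (i - 1)) (some (i - 1 + clumpSize))
        let counts1 := st.1.modify outK 0 (· - 1)
        let inPos := i + frameSize - clumpSize
        let inK := PySem.Str.slice dna (some inPos) (some (inPos + clumpSize))
        let counts2 := counts1.insert inK (counts1.getD inK 0 + 1)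
        let res := if counts2.getD inK 0 ≥ requiredOccurence then PySem.Set.add st.2 inK else st.2
        (counts2, res)) (counts, result)).2

-- ===== PRECONDITION & SPEC =====
-- Pre_ excludes nonpositive clumpSize (with a frame that fits) and negative frameSize overlapping
-- the string: there Python's negative-index slicing makes A slice wrapped or empty fragments and
-- count them as clumps — inputs outside the k-mer task's natural domain; B reports no clumps there.
def Pre_clumps (dna : String) (frameSize : Int) (clumpSize : Int) (requiredOccurence : Int) : Prop :=
  (1 ≤ clumpSize ∧ 1 ≤ frameSize) ∨ frameSize = 0 ∨
    frameSize + (dna.toList.length : Int) ≤ 0 ∨ (dna.toList.length : Int) < frameSize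
instance (dna : String) (frameSize : Int) (clumpSize : Int) (requiredOccurence : Int) : Decidable (Pre_clumps dna frameSize clumpSize requiredOccurence) := by unfold Pre_clumps; infer_instance

def pvWitness_clumps : String × Int × Int × Int := ("AGCTAGCA", 5, 2, 2)

def Spec_clumps (dna : String) (frameSize : Int) (clumpSize : Int) (requiredOccurence : Int) (out : List String) : Prop := out = clumps_alt dna frameSize clumpSize requiredOccurence
instance (dna : String) (frameSize : Int) (clumpSize : Int) (requiredOccurence : Int) (out : List String) : Decidable (Spec_clumps dna frameSize clumpSize requiredOccurence out) := by unfold Spec_clumps; infer_instance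

-- ===== CLAIM (what is proved, stated in full; the proofs are below) =====
def Claim_equal_clumps : Prop := ∀ (dna : String) (frameSize : Int) (clumpSize : Int) (requiredOccurence : Int), Dom_clumps dna frameSize clumpSize requiredOccurence → Pre_clumps dna frameSize clumpSize requiredOccurence → Spec_clumps dna frameSize clumpSize requiredOccurence (clumps dna frameSize clumpSize requiredOccurence)

-- ===== LEMMAS AND PROOFS =====

-- the k-mer of length c starting at position j, and the k-mer list of the window at position i
def pvKmer (dna : String) (c j : Nat) : String :=
  PySem.Str.slice dna (some (j : Int)) (some ((j : Int) + (c : Int)))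
def pvWin (dna : String) (c L i : Nat) : List String :=
  (List.range L).map (fun k => pvKmer dna c (i + k))
-- the k-mers of a window that meet the threshold, in first-occurrence order
def pvQual (r : Int) (xs : List String) : List String :=
  (PySem.Set.ofList xs).filter (fun k => decide (r ≤ (xs.count k : Int)))
-- A's loop body for one frame, and B's loop body for one slide step (verbatim from the ports)
def pvABody (dna : String) (frameSize clumpSize r : Int) (acc : PySem.Set String) (i : Int) : PySem.Set String :=
  let subDna := PySem.Str.slice dna (some i) (some (i + frameSize))
  let d : PySem.Dict String Int :=
    (PySem.List.pyRange 0 (PySem.Str.len subDna) 1).foldl (fun d j =>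
      if j + clumpSize ≤ PySem.Str.len subDna then
        let c := PySem.Str.slice subDna (some j) (some (j + clumpSize))
        if d.contains c then d.modify c 0 (· + 1) else d.insert c 1
      else d) PySem.Dict.empty
  d.items.foldl (fun acc p => if p.2 ≥ r then PySem.Set.add acc p.1 else acc) acc
def pvBStep (dna : String) (frameSize clumpSize r : Int)
    (st : PySem.Dict String Int × PySem.Set String) (i : Int) :
    PySem.Dict String Int × PySem.Set String :=
  let outK := PySem.Str.slice dna (some (i - 1)) (some (i - 1 + clumpSize))
  let counts1 := st.1.modify outK 0 (· - 1)
  let inPos := i + frameSize - clumpSize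
  let inK := PySem.Str.slice dna (some inPos) (some (inPos + clumpSize))
  let counts2 := counts1.insert inK (counts1.getD inK 0 + 1)
  let res := if counts2.getD inK 0 ≥ r then PySem.Set.add st.2 inK else st.2
  (counts2, res)

theorem pvKmer_toList (dna : String) (c j : Nat) :
    (pvKmer dna c j).toList = (dna.toList.drop j).take c := by
  simp [pvKmer, PySem.Str.toList_slice, PySem.Chars.slice_eq_listSlice,
    PySem.List.slice_natCast_add]

theorem pvWin_cons (dna : String) (c L i : Nat) :
    pvWin dna c (L + 1) i = pvKmer dna c i :: pvWin dna c L (i + 1) := by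
  unfold pvWin
  rw [List.range_succ_eq_map, List.map_cons, List.map_map]
  congr 1
  apply List.map_congr_left
  intro a _
  simp only [Function.comp_apply]
  congr 1
  omega

theorem pvWin_snoc (dna : String) (c L i : Nat) :
    pvWin dna c (L + 1) i = pvWin dna c L i ++ [pvKmer dna c (i + L)] := by
  simp [pvWin, List.range_succ]

theorem setfold_sub (l : List String) (acc : PySem.Set String)
    (h : ∀ k ∈ l, k ∈ acc) : l.foldl PySem.Set.add acc = acc := by
  induction l generalizing acc with
  | nil => rfl
  | cons a t ih =>
    simp only [List.foldl_cons]
    rw [PySem.Set.add_of_mem (h a (by simp))]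
    exact ih acc (fun k hk => h k (by simp [hk]))

theorem mem_setfold (l : List String) (acc : PySem.Set String) {k : String}
    (h : k ∈ acc ∨ k ∈ l) : k ∈ l.foldl PySem.Set.add acc := by
  induction l generalizing acc with
  | nil => simpa using h
  | cons a t ih =>
    simp only [List.foldl_cons]
    rcases h with h | h
    · exact ih _ (Or.inl ((PySem.Set.mem_add _ _ _).2 (Or.inl h)))
    · rcases List.mem_cons.1 h with rfl | h
      · exact ih _ (Or.inl ((PySem.Set.mem_add _ _ _).2 (Or.inr rfl)))
      · exact ih _ (Or.inr h)

theorem setfold_one (l : List String) (acc : PySem.Set String) (x : String)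
    (hnd : l.Nodup) (h : ∀ k ∈ l, k ≠ x → k ∈ acc) :
    l.foldl PySem.Set.add acc = if x ∈ l then PySem.Set.add acc x else acc := by
  induction l generalizing acc with
  | nil => simp
  | cons a t ih =>
    simp only [List.foldl_cons]
    by_cases hax : a = x
    · subst hax
      have ht : ∀ k ∈ t, k ∈ PySem.Set.add acc a := by
        intro k hk
        have hka : k ≠ a := by
          rintro rfl; exact (List.nodup_cons.1 hnd).1 hk
        exact (PySem.Set.mem_add _ _ _).2 (Or.inl (h k (by simp [hk]) hka))
      rw [setfold_sub t _ ht]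
      simp
    · rw [PySem.Set.add_of_mem (h a (by simp) hax)]
      rw [ih acc (List.nodup_cons.1 hnd).2 (fun k hk => h k (by simp [hk]))]
      by_cases hx : x ∈ t
      · simp [hx, List.mem_cons]
      · simp [hx, List.mem_cons, Ne.symm hax]

theorem range_filter_lt (M T : Nat) :
    (List.range M).filter (fun k => decide (k < T)) = List.range (min M T) := by
  induction M with
  | zero => simp
  | succ m ih =>
    rw [List.range_succ, List.filter_append, ih]
    by_cases h : m < T
    · have h1 : min (m+1) T = (min m T) + 1 := by omega
      have h2 : min m T = m := by omega
      simp [h, h2, List.range_succ]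
    · have h1 : min (m+1) T = min m T := by omega
      simp [h, h1]

theorem pyRange_filter (n f : Int) (hf : 1 ≤ f) :
    (PySem.List.pyRange 0 n 1).filter (fun i => decide (i + f ≤ n)) =
      PySem.List.pyRange 0 (n - f + 1) 1 := by
  rw [PySem.List.pyRange_one, PySem.List.pyRange_one, List.filter_map]
  have hT : (n - f + 1 - 0).toNat = min (n - 0).toNat (n - f + 1 - 0).toNat := by omega
  rw [hT, ← range_filter_lt]
  congr 1
  apply List.filter_congr
  intro k _
  simp only [Function.comp_apply, zero_add, decide_eq_decide]
  omega

theorem dict_step (d : PySem.Dict String Int) (c : String) :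
    (if d.contains c then d.modify c 0 (· + 1) else d.insert c 1) =
      d.insert c (d.getD c 0 + 1) := by
  by_cases h : d.contains c
  · simp [h, PySem.Dict.modify]
  · have h' : d.contains c = false := by simpa using h
    rw [if_neg (by simp [h'])]
    rw [PySem.Dict.getD_of_not_contains (d := d) (k := c) (d0 := (0:Int)) h', zero_add]

theorem counter_items_fold (xs : List String) (r : Int) (acc : PySem.Set String) :
    (PySem.Dict.counter xs).items.foldl
        (fun acc p => if p.2 ≥ r then PySem.Set.add acc p.1 else acc) acc =
      (pvQual r xs).foldl PySem.Set.add acc := by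
  unfold pvQual
  rw [PySem.Dict.items_counter, List.foldl_map]
  rw [← PySem.List.foldl_if_eq_foldl_filter (fun k => decide (r ≤ (xs.count k : Int)))
        PySem.Set.add (PySem.Set.ofList xs) acc]
  apply PySem.List.foldl_congr_mem
  intro a x _
  simp [ge_iff_le]

theorem frame_toList (dna : String) (fn k : Nat) :
    (PySem.Str.slice dna (some (k : Int)) (some ((k : Int) + (fn : Int)))).toList
      = (dna.toList.drop k).take fn := by
  simp [PySem.Str.toList_slice, PySem.Chars.slice_eq_listSlice, PySem.List.slice_natCast_add]

theorem frame_len (dna : String) (fn k : Nat) (hk : k + fn ≤ dna.toList.length) :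
    PySem.Str.len (PySem.Str.slice dna (some (k : Int)) (some ((k : Int) + (fn : Int)))) = (fn : Int) := by
  rw [PySem.Str.len_eq, frame_toList, List.length_take, List.length_drop]
  omega

theorem frame_clump (dna : String) (fn cn k t : Nat) (ht : t + cn ≤ fn) :
    PySem.Str.slice (PySem.Str.slice dna (some (k : Int)) (some ((k : Int) + (fn : Int))))
        (some (t : Int)) (some ((t : Int) + (cn : Int))) = pvKmer dna cn (k + t) := by
  apply String.toList_inj.mp
  rw [pvKmer_toList]
  have h1 : (PySem.Str.slice (PySem.Str.slice dna (some (k : Int)) (some ((k : Int) + (fn : Int))))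
      (some (t : Int)) (some ((t : Int) + (cn : Int)))).toList
      = ((((dna.toList.drop k).take fn).drop t).take cn) := by
    rw [PySem.Str.toList_slice, PySem.Chars.slice_eq_listSlice, PySem.List.slice_natCast_add,
      frame_toList]
  rw [h1, List.drop_take, List.drop_drop, List.take_take]
  have h2 : min cn (fn - t) = cn := by omega
  rw [h2]

theorem clumps_eq (dna : String) (f c r : Int) :
    clumps dna f c r = (PySem.List.pyRange 0 (PySem.Str.len dna) 1).foldl
      (fun acc i => if i + f ≤ PySem.Str.len dna then pvABody dna f c r acc i else acc)
      PySem.Set.empty := rfl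

-- A's body for a fitting frame counts exactly the window's k-mers and adds the qualifying ones
theorem pvABody_eq (dna : String) (fn cn : Nat) (r : Int) (hc : 1 ≤ cn) (hcf : cn ≤ fn)
    (k : Nat) (hk : k + fn ≤ dna.toList.length) (acc : PySem.Set String) :
    pvABody dna (fn : Int) (cn : Int) r acc (k : Int) =
      (pvQual r (pvWin dna cn (fn - cn + 1) k)).foldl PySem.Set.add acc := by
  unfold pvABody
  simp only [frame_len dna fn k hk]
  rw [PySem.List.foldl_ite_eq_foldl_filter (p := fun j => j + (cn : Int) ≤ (fn : Int))]
  rw [pyRange_filter (fn : Int) (cn : Int) (by exact_mod_cast hc)]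
  rw [PySem.List.pyRange_one, List.foldl_map]
  have hT : ((fn : Int) - (cn : Int) + 1 - 0).toNat = fn - cn + 1 := by omega
  rw [hT]
  have hbody : ∀ (d : PySem.Dict String Int), ∀ t ∈ List.range (fn - cn + 1),
      (fun (d : PySem.Dict String Int) (j : Int) =>
        (fun cs => if d.contains cs then d.modify cs 0 (· + 1) else d.insert cs 1)
          (PySem.Str.slice (PySem.Str.slice dna (some (k : Int)) (some ((k : Int) + (fn : Int))))
            (some j) (some (j + (cn : Int))))) d ((0 : Int) + (t : Int))
      = d.insert (pvKmer dna cn (k + t)) (d.getD (pvKmer dna cn (k + t)) 0 + 1) := by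
    intro d t ht
    have ht' : t + cn ≤ fn := by
      have := List.mem_range.1 ht
      omega
    simp only [zero_add]
    rw [frame_clump dna fn cn k t ht', dict_step]
  rw [PySem.List.foldl_congr_mem _ _ _ _ hbody]
  have hfold : (List.range (fn - cn + 1)).foldl
      (fun (d : PySem.Dict String Int) t =>
        d.insert (pvKmer dna cn (k + t)) (d.getD (pvKmer dna cn (k + t)) 0 + 1))
      PySem.Dict.empty = PySem.Dict.counter (pvWin dna cn (fn - cn + 1) k) := by
    rw [← PySem.Dict.foldl_insert_getD_add_one_eq_counter]
    unfold pvWin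
    rw [List.foldl_map]
  rw [hfold, counter_items_fold]

-- unfolding B in the main region
theorem clumps_alt_eq (dna : String) (f c r : Int)
    (h1 : ¬(f ≤ 0 ∨ PySem.Str.len dna < f)) (h2 : ¬(c ≤ 0 ∨ f < c)) :
    clumps_alt dna f c r =
      ((PySem.List.pyRange 1 (PySem.Str.len dna - f + 1) 1).foldl (pvBStep dna f c r)
        ((PySem.List.pyRange 0 (f - c + 1) 1).foldl (fun d j =>
            d.insert (PySem.Str.slice dna (some j) (some (j + c)))
              (d.getD (PySem.Str.slice dna (some j) (some (j + c))) 0 + 1)) PySem.Dict.empty,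
         ((PySem.List.pyRange 0 (f - c + 1) 1).foldl (fun d j =>
            d.insert (PySem.Str.slice dna (some j) (some (j + c)))
              (d.getD (PySem.Str.slice dna (some j) (some (j + c))) 0 + 1)) PySem.Dict.empty).items.foldl
           (fun acc p => if p.2 ≥ r then PySem.Set.add acc p.1 else acc) PySem.Set.empty)).2 := by
  unfold clumps_alt
  rw [if_neg h1, if_neg h2]
  rfl

-- B's initial counter is the counter of window 0
theorem counts0_eq (dna : String) (fn cn : Nat) (hcf : cn ≤ fn) :
    (PySem.List.pyRange 0 ((fn : Int) - (cn : Int) + 1) 1).foldl (fun d j =>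
        d.insert (PySem.Str.slice dna (some j) (some (j + (cn : Int))))
          (d.getD (PySem.Str.slice dna (some j) (some (j + (cn : Int)))) 0 + 1)) PySem.Dict.empty =
      PySem.Dict.counter (pvWin dna cn (fn - cn + 1) 0) := by
  rw [PySem.List.pyRange_one, List.foldl_map]
  have hT : ((fn : Int) - (cn : Int) + 1 - 0).toNat = fn - cn + 1 := by omega
  rw [hT]
  have hbody : ∀ (d : PySem.Dict String Int), ∀ t ∈ List.range (fn - cn + 1),
      (fun (d : PySem.Dict String Int) (j : Int) =>
        d.insert (PySem.Str.slice dna (some j) (some (j + (cn : Int))))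
          (d.getD (PySem.Str.slice dna (some j) (some (j + (cn : Int)))) 0 + 1)) d ((0 : Int) + (t : Int))
      = d.insert (pvKmer dna cn (0 + t)) (d.getD (pvKmer dna cn (0 + t)) 0 + 1) := by
    intro d t _
    have h0 : (0 : Int) + (t : Int) = ((t : Nat) : Int) := by ring
    have hK : pvKmer dna cn (0 + t) = pvKmer dna cn t := by
      congr 1
      omega
    rw [h0, hK]
    rfl
  rw [PySem.List.foldl_congr_mem _ _ _ _ hbody]
  rw [← PySem.Dict.foldl_insert_getD_add_one_eq_counter]
  unfold pvWin
  rw [List.foldl_map]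

-- decrement the leaving k-mer, increment the entering one: the counter follows the window
theorem dict_shift (counts : PySem.Dict String Int) (outS inS : String) (M : List String)
    (hcounts : ∀ k, counts.getD k 0 = (List.count k (outS :: M) : Int)) (q : String) :
    ((counts.modify outS 0 (· - 1)).insert inS
        ((counts.modify outS 0 (· - 1)).getD inS 0 + 1)).getD q 0
      = (List.count q (M ++ [inS]) : Int) := by
  rw [PySem.Dict.getD_insert, PySem.Dict.getD_modify, PySem.Dict.getD_modify,
    hcounts, hcounts, hcounts]
  by_cases hq1 : q = inS <;> by_cases hq3 : q = outS
  · rw [← hq1, ← hq3]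
    simp [List.count_append]
  · rw [← hq1]
    simp [hq3, List.count_append, List.count_cons, beq_iff_eq]
    exact fun h => hq3 h.symm
  · rw [← hq3]
    simp [hq1, List.count_append, List.count_cons, beq_iff_eq]
    exact fun h => hq1 h.symm
  · simp [hq1, hq3, List.count_append, List.count_cons, beq_iff_eq]
    rw [if_neg (fun h => hq3 h.symm), if_neg (fun h => hq1 h.symm)]

-- the slide: given the counter and result for window ii, folding the remaining steps agrees
theorem slide_ind (dna : String) (fn cn : Nat) (r : Int) (hc : 1 ≤ cn) (hcf : cn ≤ fn)
    (hfN : fn ≤ dna.toList.length) :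
    ∀ (t ii : Nat) (counts : PySem.Dict String Int) (res : PySem.Set String),
    ii + t = dna.toList.length - fn →
    (∀ k, counts.getD k 0 = ((pvWin dna cn (fn - cn + 1) ii).count k : Int)) →
    (∀ k, k ∈ pvWin dna cn (fn - cn + 1) ii →
        r ≤ ((pvWin dna cn (fn - cn + 1) ii).count k : Int) → k ∈ res) →
    (PySem.List.pyRange ((ii : Int) + 1) ((dna.toList.length : Int) - (fn : Int) + 1) 1).foldl
        (fun acc i => (pvQual r (pvWin dna cn (fn - cn + 1) i.toNat)).foldl PySem.Set.add acc) res =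
      ((PySem.List.pyRange ((ii : Int) + 1) ((dna.toList.length : Int) - (fn : Int) + 1) 1).foldl
        (pvBStep dna (fn : Int) (cn : Int) r) (counts, res)).2 := by
  intro t
  induction t with
  | zero =>
    intro ii counts res hii _ _
    rw [PySem.List.pyRange_one_eq_nil (by omega)]
    rfl
  | succ t ih =>
    intro ii counts res hii hcounts hres
    have hlt : ((ii : Int) + 1) < ((dna.toList.length : Int) - (fn : Int) + 1) := by omega
    rw [PySem.List.pyRange_one_cons hlt]
    simp only [List.foldl_cons]
    -- abbreviations for the leaving and entering k-mers and the shared middle of the two windows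
    have houtK : PySem.Str.slice dna (some (((ii : Int) + 1) - 1))
        (some ((((ii : Int) + 1) - 1) + (cn : Int))) = pvKmer dna cn ii := by
      have h1 : ((ii : Int) + 1) - 1 = ((ii : Nat) : Int) := by ring
      rw [h1]
      rfl
    have hinK : PySem.Str.slice dna (some (((ii : Int) + 1) + (fn : Int) - (cn : Int)))
        (some ((((ii : Int) + 1) + (fn : Int) - (cn : Int)) + (cn : Int)))
        = pvKmer dna cn (ii + 1 + (fn - cn)) := by
      have h1 : ((ii : Int) + 1) + (fn : Int) - (cn : Int) = (((ii + 1 + (fn - cn) : Nat)) : Int) := by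
        push_cast
        omega
      rw [h1]
      rfl
    have hWo : pvWin dna cn (fn - cn + 1) ii
        = pvKmer dna cn ii :: pvWin dna cn (fn - cn) (ii + 1) := pvWin_cons dna cn (fn - cn) ii
    have hWn : pvWin dna cn (fn - cn + 1) (ii + 1)
        = pvWin dna cn (fn - cn) (ii + 1) ++ [pvKmer dna cn (ii + 1 + (fn - cn))] :=
      pvWin_snoc dna cn (fn - cn) (ii + 1)
    -- the updated counter counts the shifted window
    have hcounts2 : ∀ q, (((counts.modify (pvKmer dna cn ii) 0 (· - 1)).insert
          (pvKmer dna cn (ii + 1 + (fn - cn)))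
          ((counts.modify (pvKmer dna cn ii) 0 (· - 1)).getD (pvKmer dna cn (ii + 1 + (fn - cn))) 0 + 1))).getD q 0
        = ((pvWin dna cn (fn - cn + 1) (ii + 1)).count q : Int) := by
      intro q
      rw [hWn]
      exact dict_shift counts (pvKmer dna cn ii) (pvKmer dna cn (ii + 1 + (fn - cn)))
        (pvWin dna cn (fn - cn) (ii + 1)) (fun k => by rw [hcounts, hWo]) q
    -- the entering k-mer is the last element of the shifted window
    have hinW : pvKmer dna cn (ii + 1 + (fn - cn)) ∈ pvWin dna cn (fn - cn + 1) (ii + 1) := by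
      rw [hWn]
      simp
    -- every other qualifying k-mer of the shifted window already qualified in the previous one
    have hother : ∀ q, q ∈ pvWin dna cn (fn - cn + 1) (ii + 1) →
        q ≠ pvKmer dna cn (ii + 1 + (fn - cn)) →
        q ∈ pvWin dna cn (fn - cn + 1) ii ∧
          (pvWin dna cn (fn - cn + 1) (ii + 1)).count q ≤ (pvWin dna cn (fn - cn + 1) ii).count q := by
      intro q hq hqne
      have hqM : q ∈ pvWin dna cn (fn - cn) (ii + 1) := by
        rw [hWn] at hq
        rcases List.mem_append.1 hq with h | h
        · exact h
        · exact absurd (List.mem_singleton.1 h) hqne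
      constructor
      · rw [hWo]
        exact List.mem_cons_of_mem _ hqM
      · have hz : List.count q [pvKmer dna cn (ii + 1 + (fn - cn))] = 0 :=
          List.count_eq_zero.2 (by simp [hqne])
        rw [hWo, hWn, List.count_append, hz, List.count_cons]
        omega
    -- A's step for the shifted window adds exactly the entering k-mer when it qualifies
    have hAstep : (pvQual r (pvWin dna cn (fn - cn + 1) (((ii : Int) + 1)).toNat)).foldl
          PySem.Set.add res
        = if r ≤ ((pvWin dna cn (fn - cn + 1) (ii + 1)).count (pvKmer dna cn (ii + 1 + (fn - cn))) : Int)
          then PySem.Set.add res (pvKmer dna cn (ii + 1 + (fn - cn))) else res := by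
      have htn : (((ii : Int) + 1)).toNat = ii + 1 := by omega
      rw [htn]
      unfold pvQual
      rw [setfold_one _ _ (pvKmer dna cn (ii + 1 + (fn - cn)))
        ((PySem.Set.nodup_ofList _).filter _)
        (by
          intro q hq hqne
          have hq1 := List.mem_filter.1 hq
          have hqW : q ∈ pvWin dna cn (fn - cn + 1) (ii + 1) :=
            (PySem.Set.mem_ofList _ _).1 hq1.1
          have hqr : r ≤ ((pvWin dna cn (fn - cn + 1) (ii + 1)).count q : Int) := by
            simpa using hq1.2
          obtain ⟨hmem, hle⟩ := hother q hqW hqne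
          exact hres q hmem (le_trans hqr (by exact_mod_cast hle)))]
      by_cases hcond : r ≤ ((pvWin dna cn (fn - cn + 1) (ii + 1)).count (pvKmer dna cn (ii + 1 + (fn - cn))) : Int)
      · rw [if_pos (List.mem_filter.2 ⟨(PySem.Set.mem_ofList _ _).2 hinW, by simpa using hcond⟩),
          if_pos hcond]
      · rw [if_neg (fun hmem => hcond (by simpa using (List.mem_filter.1 hmem).2)),
          if_neg hcond]
    -- B's step, unfolded
    have hBstep : pvBStep dna (fn : Int) (cn : Int) r (counts, res) ((ii : Int) + 1)
        = ((counts.modify (pvKmer dna cn ii) 0 (· - 1)).insert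
            (pvKmer dna cn (ii + 1 + (fn - cn)))
            ((counts.modify (pvKmer dna cn ii) 0 (· - 1)).getD (pvKmer dna cn (ii + 1 + (fn - cn))) 0 + 1),
          if r ≤ ((pvWin dna cn (fn - cn + 1) (ii + 1)).count (pvKmer dna cn (ii + 1 + (fn - cn))) : Int)
          then PySem.Set.add res (pvKmer dna cn (ii + 1 + (fn - cn))) else res) := by
      unfold pvBStep
      simp only [houtK, hinK, ge_iff_le]
      rw [hcounts2 (pvKmer dna cn (ii + 1 + (fn - cn)))]
    rw [hAstep, hBstep]
    -- the new result still contains every qualifying k-mer of the shifted window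
    have hres2 : ∀ q, q ∈ pvWin dna cn (fn - cn + 1) (ii + 1) →
        r ≤ ((pvWin dna cn (fn - cn + 1) (ii + 1)).count q : Int) →
        q ∈ (if r ≤ ((pvWin dna cn (fn - cn + 1) (ii + 1)).count (pvKmer dna cn (ii + 1 + (fn - cn))) : Int)
          then PySem.Set.add res (pvKmer dna cn (ii + 1 + (fn - cn))) else res) := by
      intro q hq hqr
      by_cases hqne : q = pvKmer dna cn (ii + 1 + (fn - cn))
      · subst hqne
        rw [if_pos hqr]
        exact (PySem.Set.mem_add _ _ _).2 (Or.inr rfl)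
      · obtain ⟨hmem, hle⟩ := hother q hq hqne
        have hq0 : q ∈ res := hres q hmem (le_trans hqr (by exact_mod_cast hle))
        by_cases hcond : r ≤ ((pvWin dna cn (fn - cn + 1) (ii + 1)).count (pvKmer dna cn (ii + 1 + (fn - cn))) : Int)
        · rw [if_pos hcond]
          exact (PySem.Set.mem_add _ _ _).2 (Or.inl hq0)
        · rwa [if_neg hcond]
    have hcast : ((ii : Int) + 1) + 1 = (((ii + 1 : Nat)) : Int) + 1 := by push_cast; ring
    rw [hcast]
    exact ih (ii + 1) _ _ (by omega) hcounts2 hres2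

-- main region: 1 ≤ clumpSize ≤ frameSize ≤ len(dna)
theorem main_eq (dna : String) (fn cn : Nat) (r : Int) (hc : 1 ≤ cn) (hcf : cn ≤ fn)
    (hfN : fn ≤ dna.toList.length) :
    clumps dna (fn : Int) (cn : Int) r = clumps_alt dna (fn : Int) (cn : Int) r := by
  have hf1 : 1 ≤ fn := le_trans hc hcf
  -- A side: keep only the fitting frames, then abstract each frame body
  rw [clumps_eq, PySem.Str.len_eq]
  rw [PySem.List.foldl_ite_eq_foldl_filter (p := fun i => i + (fn : Int) ≤ (dna.toList.length : Int))]
  rw [pyRange_filter (dna.toList.length : Int) (fn : Int) (by exact_mod_cast hf1)]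
  have hbody : ∀ (acc : PySem.Set String), ∀ i ∈ PySem.List.pyRange 0 ((dna.toList.length : Int) - (fn : Int) + 1) 1,
      pvABody dna (fn : Int) (cn : Int) r acc i
      = (pvQual r (pvWin dna cn (fn - cn + 1) i.toNat)).foldl PySem.Set.add acc := by
    intro acc i hi
    have h0 : 0 ≤ i ∧ i < (dna.toList.length : Int) - (fn : Int) + 1 := by
      simpa [PySem.List.mem_pyRange_one] using hi
    obtain ⟨k, rfl⟩ : ∃ k : Nat, i = (k : Int) := ⟨i.toNat, by omega⟩
    rw [pvABody_eq dna fn cn r hc hcf k (by omega) acc]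
    simp [Int.toNat_natCast]
  rw [PySem.List.foldl_congr_mem _ _ _ _ hbody]
  rw [PySem.List.pyRange_one_cons (by omega : (0 : Int) < (dna.toList.length : Int) - (fn : Int) + 1)]
  simp only [List.foldl_cons]
  -- B side: unfold the guards, identify the initial counter and result
  rw [clumps_alt_eq dna (fn : Int) (cn : Int) r
    (by rw [PySem.Str.len_eq]; omega) (by omega)]
  rw [PySem.Str.len_eq]
  rw [counts0_eq dna fn cn hcf, counter_items_fold]
  -- both sides now slide over the same range from the same start
  have hres0 : ∀ k, k ∈ pvWin dna cn (fn - cn + 1) 0 →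
      r ≤ ((pvWin dna cn (fn - cn + 1) 0).count k : Int) →
      k ∈ (pvQual r (pvWin dna cn (fn - cn + 1) 0)).foldl PySem.Set.add PySem.Set.empty := by
    intro k hk hkr
    apply mem_setfold
    right
    exact List.mem_filter.2 ⟨(PySem.Set.mem_ofList _ _).2 hk, by simpa using hkr⟩
  have hstep := slide_ind dna fn cn r hc hcf hfN (dna.toList.length - fn) 0
    (PySem.Dict.counter (pvWin dna cn (fn - cn + 1) 0))
    ((pvQual r (pvWin dna cn (fn - cn + 1) 0)).foldl PySem.Set.add PySem.Set.empty)
    (by omega) (fun q => PySem.Dict.getD_counter _ _) hres0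
  rw [show ((0 : Nat) : Int) + 1 = 1 from by norm_num] at hstep
  exact hstep

-- degenerate regions where both return no clumps
theorem a_empty_of_no_frame (dna : String) (f c r : Int) (h : (dna.toList.length : Int) < f) :
    clumps dna f c r = [] := by
  rw [clumps_eq, PySem.Str.len_eq]
  have hbody : ∀ (acc : PySem.Set String), ∀ i ∈ PySem.List.pyRange 0 (dna.toList.length : Int) 1,
      (fun acc i => if i + f ≤ (dna.toList.length : Int) then pvABody dna f c r acc i else acc) acc i
      = (fun (acc : PySem.Set String) (_ : Int) => acc) acc i := by
    intro acc i hi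
    have h0 : 0 ≤ i ∧ i < (dna.toList.length : Int) := by
      simpa [PySem.List.mem_pyRange_one] using hi
    show (if i + f ≤ (dna.toList.length : Int) then pvABody dna f c r acc i else acc) = acc
    exact if_neg (by omega)
  rw [PySem.List.foldl_congr_mem _ _ _ _ hbody, PySem.List.foldl_ignore]
  rfl

theorem a_empty_of_empty_frames (dna : String) (f c r : Int)
    (h : f = 0 ∨ f + (dna.toList.length : Int) ≤ 0) :
    clumps dna f c r = [] := by
  rw [clumps_eq, PySem.Str.len_eq]
  have hsub : ∀ i : Int, 0 ≤ i → i < (dna.toList.length : Int) →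
      PySem.Str.len (PySem.Str.slice dna (some i) (some (i + f))) = 0 := by
    intro i h0 h1
    rw [PySem.Str.len_eq]
    have hlen : (PySem.Str.slice dna (some i) (some (i + f))).toList.length = 0 := by
      rw [PySem.Str.toList_slice, PySem.Chars.slice_eq_listSlice, PySem.List.length_slice]
      have hc1 : PySem.List.clampIdx dna.toList.length (i + f) ≤
          PySem.List.clampIdx dna.toList.length i := by
        unfold PySem.List.clampIdx
        split_ifs <;> omega
      omega
    omega
  have hbody : ∀ (acc : PySem.Set String), ∀ i ∈ PySem.List.pyRange 0 (dna.toList.length : Int) 1,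
      (fun acc i => if i + f ≤ (dna.toList.length : Int) then pvABody dna f c r acc i else acc) acc i
      = (fun (acc : PySem.Set String) (_ : Int) => acc) acc i := by
    intro acc i hi
    have h0 : 0 ≤ i ∧ i < (dna.toList.length : Int) := by
      simpa [PySem.List.mem_pyRange_one] using hi
    show (if i + f ≤ (dna.toList.length : Int) then pvABody dna f c r acc i else acc) = acc
    by_cases hg : i + f ≤ (dna.toList.length : Int)
    · rw [if_pos hg]
      unfold pvABody
      simp only [hsub i h0.1 h0.2]
      rfl
    · exact if_neg hg
  rw [PySem.List.foldl_congr_mem _ _ _ _ hbody, PySem.List.foldl_ignore]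
  rfl

theorem a_empty_of_big_clump (dna : String) (f c r : Int) (hf : 1 ≤ f)
    (hfN : f ≤ (dna.toList.length : Int)) (hcf : f < c) :
    clumps dna f c r = [] := by
  rw [clumps_eq, PySem.Str.len_eq]
  have hsub : ∀ i : Int, 0 ≤ i →
      PySem.Str.len (PySem.Str.slice dna (some i) (some (i + f))) ≤ f := by
    intro i h0
    rw [PySem.Str.len_eq]
    have hlen : (PySem.Str.slice dna (some i) (some (i + f))).toList.length ≤ f.toNat := by
      rw [PySem.Str.toList_slice, PySem.Chars.slice_eq_listSlice,
        PySem.List.slice_toNat _ h0 (by omega)]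
      calc ((dna.toList.drop i.toNat).take ((i + f).toNat - i.toNat)).length
          ≤ (i + f).toNat - i.toNat := by
            rw [List.length_take]
            omega
        _ ≤ f.toNat := by omega
    omega
  have hbody : ∀ (acc : PySem.Set String), ∀ i ∈ PySem.List.pyRange 0 (dna.toList.length : Int) 1,
      (fun acc i => if i + f ≤ (dna.toList.length : Int) then pvABody dna f c r acc i else acc) acc i
      = (fun (acc : PySem.Set String) (_ : Int) => acc) acc i := by
    intro acc i hi
    have h0 : 0 ≤ i ∧ i < (dna.toList.length : Int) := by
      simpa [PySem.List.mem_pyRange_one] using hi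
    show (if i + f ≤ (dna.toList.length : Int) then pvABody dna f c r acc i else acc) = acc
    by_cases hg : i + f ≤ (dna.toList.length : Int)
    · rw [if_pos hg]
      show (((PySem.List.pyRange 0 (PySem.Str.len (PySem.Str.slice dna (some i) (some (i + f)))) 1).foldl
          (fun (d : PySem.Dict String Int) (j : Int) =>
            if j + c ≤ PySem.Str.len (PySem.Str.slice dna (some i) (some (i + f))) then
              (fun cs => if d.contains cs then d.modify cs 0 (· + 1) else d.insert cs 1)
                (PySem.Str.slice (PySem.Str.slice dna (some i) (some (i + f))) (some j) (some (j + c)))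
            else d) PySem.Dict.empty).items.foldl
          (fun acc p => if p.2 ≥ r then PySem.Set.add acc p.1 else acc) acc) = acc
      have hinner : ∀ (d : PySem.Dict String Int), ∀ j ∈ PySem.List.pyRange 0
          (PySem.Str.len (PySem.Str.slice dna (some i) (some (i + f)))) 1,
          (fun (d : PySem.Dict String Int) (j : Int) =>
            if j + c ≤ PySem.Str.len (PySem.Str.slice dna (some i) (some (i + f))) then
              (fun cs => if d.contains cs then d.modify cs 0 (· + 1) else d.insert cs 1)
                (PySem.Str.slice (PySem.Str.slice dna (some i) (some (i + f))) (some j) (some (j + c)))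
            else d) d j
          = (fun (d : PySem.Dict String Int) (_ : Int) => d) d j := by
        intro d j hj
        have hj0 : 0 ≤ j := by
          have := (PySem.List.mem_pyRange_one.1 hj).1
          omega
        show (if j + c ≤ PySem.Str.len (PySem.Str.slice dna (some i) (some (i + f))) then _ else d) = d
        exact if_neg (by have := hsub i h0.1; omega)
      rw [PySem.List.foldl_congr_mem _ _ _ _ hinner, PySem.List.foldl_ignore]
      rfl
    · exact if_neg hg
  rw [PySem.List.foldl_congr_mem _ _ _ _ hbody, PySem.List.foldl_ignore]
  rfl

-- ===== VERDICT (by name: the statement is the Claim_ definition above) =====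
theorem clumps_spec : Claim_equal_clumps := by
  intro dna f c r _hD hP
  unfold Spec_clumps
  by_cases hfN : (dna.toList.length : Int) < f
  · rw [a_empty_of_no_frame dna f c r hfN]
    unfold clumps_alt
    rw [if_pos (by rw [PySem.Str.len_eq]; right; exact_mod_cast hfN)]
    rfl
  · rcases hP with ⟨hc, hf⟩ | hP
    · by_cases hcf : f < c
      · rw [a_empty_of_big_clump dna f c r hf (by omega) hcf]
        unfold clumps_alt
        rw [if_neg (by rw [PySem.Str.len_eq]; omega), if_pos (by right; exact hcf)]
        rfl
      · have hcf' : c ≤ f := by omega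
        have hfN' : f ≤ (dna.toList.length : Int) := by omega
        obtain ⟨fn, rfl⟩ : ∃ fn : Nat, f = (fn : Int) := ⟨f.toNat, by omega⟩
        obtain ⟨cn, rfl⟩ : ∃ cn : Nat, c = (cn : Int) := ⟨c.toNat, by omega⟩
        exact main_eq dna fn cn r (by exact_mod_cast hc) (by exact_mod_cast hcf')
          (by exact_mod_cast hfN')
    · have hP' : f = 0 ∨ f + (dna.toList.length : Int) ≤ 0 := by omega
      rw [a_empty_of_empty_frames dna f c r hP']
      unfold clumps_alt
      rw [if_pos (by rw [PySem.Str.len_eq]; left; omega)]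
      rfl
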